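-- pv_equiv track=rewrite | github.com/00jup/Bioinformatics-class | bioaligner.py | _compute_max_gaps
-- ===== SOURCE A (Python) =====
-- def _compute_max_gaps(pairs, orig_len):
--     """For each original center position, find maximum gaps inserted across alignments."""
--     max_gaps = [0] * (orig_len + 1)
--     for center_aln, _ in pairs:
--         j = 0
--         gap_count = 0
--         for ch in center_aln:
--             if ch == '-':
--                 gap_count += 1
--             else:
--                 if gap_count > max_gaps[j]:
--                     max_gaps[j] = gap_count
--                 gap_count = 0
--                 j += 1
--         if gap_count > max_gaps[orig_len]:
--             max_gaps[orig_len] = gap_count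
--     return max_gaps
-- ===== SOURCE B (Python) =====
-- def _gap_runs(s):
--     """Lengths of the runs of '-' around the non-gap characters of s
--     (one entry per run, including the empty runs between adjacent non-gaps)."""
--     runs = [0]
--     for ch in s:
--         if ch == '-':
--             runs[-1] += 1
--         else:
--             runs.append(0)
--     return runs
--
--
-- def _compute_max_gaps(pairs, orig_len):
--     """For each original center position, find maximum gaps inserted across alignments."""
--     max_gaps = [0] * (orig_len + 1)
--     for center_aln, _ in pairs:
--         runs = _gap_runs(center_aln)
--         for j, g in enumerate(runs[:-1]):
--             max_gaps[j] = max(max_gaps[j], g)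
--         max_gaps[orig_len] = max(max_gaps[orig_len], runs[-1])
--     return max_gaps
-- ===== Notes on version B (the rewrite author's own statement) =====
-- stated objective: alternative
-- what changed: B builds a per-alignment gap-run profile in one pass and merges it into max_gaps by elementwise max, replacing A's inline j/gap_count state machine with conditional writes; Pre_ excludes exactly the inputs where A raises IndexError (nonempty pairs with orig_len < 0, or an alignment with more than orig_len + 1 non-gap characters), on which B raises too.
import Mathlib
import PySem

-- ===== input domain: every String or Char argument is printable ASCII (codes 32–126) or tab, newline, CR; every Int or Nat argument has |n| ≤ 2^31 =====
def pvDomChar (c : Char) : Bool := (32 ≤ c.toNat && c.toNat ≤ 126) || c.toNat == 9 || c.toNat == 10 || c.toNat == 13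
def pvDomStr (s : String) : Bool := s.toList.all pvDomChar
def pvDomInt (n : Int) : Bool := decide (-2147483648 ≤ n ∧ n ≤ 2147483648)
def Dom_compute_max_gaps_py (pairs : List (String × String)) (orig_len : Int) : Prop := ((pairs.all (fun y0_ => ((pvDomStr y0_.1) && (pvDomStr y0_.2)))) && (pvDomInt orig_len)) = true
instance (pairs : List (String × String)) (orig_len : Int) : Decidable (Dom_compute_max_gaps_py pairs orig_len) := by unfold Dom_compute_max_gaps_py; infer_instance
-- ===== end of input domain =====

-- B replaces A's inline two-counter scan by a build-profile-then-merge decomposition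
-- (gap-run profile per alignment, then elementwise max merge); objective: alternative.


-- ===== PORT A =====
-- 'if gap_count > max_gaps[j]: max_gaps[j] = gap_count' (conditional in-place write)
def pvUpd (mg : List Int) (i : Int) (g : Int) : List Int :=
  if g > PySem.List.pyGetD mg i 0 then PySem.List.pySetD mg i g else mg

-- the body of A's inner 'for ch in center_aln' loop; state = (max_gaps, j, gap_count)
def pvStepA (st : List Int × Int × Int) (ch : Char) : List Int × Int × Int :=
  if ch = '-' then (st.1, st.2.1, st.2.2 + 1)
  else (pvUpd st.1 st.2.1 st.2.2, st.2.1 + 1, 0)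

-- the body of A's outer 'for center_aln, _ in pairs' loop
def pvPairA (orig_len : Int) (max_gaps : List Int) (p : String × String) : List Int :=
  let st := p.1.toList.foldl pvStepA (max_gaps, 0, 0)
  pvUpd st.1 orig_len st.2.2

def compute_max_gaps_py (pairs : List (String × String)) (orig_len : Int) : List Int :=
  pairs.foldl (pvPairA orig_len) (List.replicate (orig_len + 1).toNat (0 : Int))

-- ===== PORT B =====
-- body of Source B's 'for ch in s' loop in _gap_runs: "runs[-1] += 1" or "runs.append(0)"
def gapRunsStep (runs : List Int) (ch : Char) : List Int :=
  if ch = '-' then PySem.List.pySetD runs (-1) (PySem.List.pyGetD runs (-1) 0 + 1)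
  else runs ++ [0]

-- Source B's _gap_runs: runs = [0]; for ch in s: …; return runs
def gap_runs (s : List Char) : List Int :=
  s.foldl gapRunsStep [0]

-- the body of Source B's 'for j, g in enumerate(runs[:-1])' loop
def pvStepB (mg : List Int) (jg : Int × Int) : List Int :=
  PySem.List.pySetD mg jg.1 (max (PySem.List.pyGetD mg jg.1 0) jg.2)

-- the body of Source B's 'for center_aln, _ in pairs' loop
def pvPairB (orig_len : Int) (mg : List Int) (p : String × String) : List Int :=
  let runs := gap_runs p.1.toList
  let mg := (PySem.List.enumerate (PySem.List.slice runs none (some (-1))) 0).foldl pvStepB mg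
  PySem.List.pySetD mg orig_len
    (max (PySem.List.pyGetD mg orig_len 0) (PySem.List.pyGetD runs (-1) 0))

def compute_max_gaps_py_alt (pairs : List (String × String)) (orig_len : Int) : List Int :=
  pairs.foldl (pvPairB orig_len) (List.replicate (orig_len + 1).toNat (0 : Int))

-- ===== PRECONDITION & SPEC =====
-- Pre_ excludes exactly the inputs on which the Python A raises IndexError: a nonempty pairs
-- list with orig_len < 0, or an alignment whose non-gap character count exceeds orig_len + 1.
def Pre_compute_max_gaps_py (pairs : List (String × String)) (orig_len : Int) : Prop :=
  (pairs ≠ [] → 0 ≤ orig_len) ∧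
  ∀ p ∈ pairs, ((p.1.toList.countP (fun ch => ch != '-') : Int) ≤ orig_len + 1)

instance (pairs : List (String × String)) (orig_len : Int) : Decidable (Pre_compute_max_gaps_py pairs orig_len) := by
  unfold Pre_compute_max_gaps_py; infer_instance

def pvWitness_compute_max_gaps_py : (List (String × String)) × Int := ([("a--b", "xy"), ("-ab-", "uv")], 2)

def Spec_compute_max_gaps_py (pairs : List (String × String)) (orig_len : Int) (out : List Int) : Prop := out = compute_max_gaps_py_alt pairs orig_len
instance (pairs : List (String × String)) (orig_len : Int) (out : List Int) : Decidable (Spec_compute_max_gaps_py pairs orig_len out) := by unfold Spec_compute_max_gaps_py; infer_instance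

-- ===== CLAIM (what is proved, stated in full; the proofs are below) =====
def Claim_equal_compute_max_gaps_py : Prop := ∀ (pairs : List (String × String)) (orig_len : Int), Dom_compute_max_gaps_py pairs orig_len → Pre_compute_max_gaps_py pairs orig_len → Spec_compute_max_gaps_py pairs orig_len (compute_max_gaps_py pairs orig_len)

-- ===== LEMMAS AND PROOFS =====

-- recursive characterisation of the gap-run profile (proof helper only)
def pvRuns (s : List Char) : List Int :=
  match s with
  | [] => [0]
  | c :: t =>
    match pvRuns t with
    | [] => []  -- unreachable: pvRuns never returns []
    | r :: rs => if c = '-' then (r + 1) :: rs else 0 :: r :: rs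

-- merge a run profile rs into mg by conditional writes at positions n, n+1, …
def pvMerge (mg : List Int) (n : Nat) : List Int → List Int
  | [] => mg
  | g :: gs => pvMerge (pvUpd mg (n : Int) g) (n + 1) gs

-- add a pending gap count to the first run
def pvBump (gc : Int) : List Int → List Int
  | [] => []
  | r :: rs => (gc + r) :: rs

-- last element, default 0
def pvLast : List Int → Int
  | [] => 0
  | [g] => g
  | _ :: g :: gs => pvLast (g :: gs)

lemma pvRuns_cons (s : List Char) : ∃ r rs, pvRuns s = r :: rs := by
  induction s with
  | nil => exact ⟨0, [], rfl⟩
  | cons c t ih =>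
    obtain ⟨r, rs, hr⟩ := ih
    by_cases hc : c = '-'
    · exact ⟨r + 1, rs, by simp [pvRuns, hr, hc]⟩
    · exact ⟨0, r :: rs, by simp [pvRuns, hr, hc]⟩

lemma pvBump_zero (rs : List Int) : pvBump 0 rs = rs := by
  cases rs <;> simp [pvBump]

lemma pySetD_neg_one_append_singleton (xs : List Int) (x v : Int) :
    PySem.List.pySetD (xs ++ [x]) (-1) v = xs ++ [v] := by
  simp [PySem.List.pySetD, PySem.List.pySet?, PySem.List.pyIdx?]

-- Source B's foldl builds, around any prefix acc with pending last run g, exactly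
-- the recursive profile with g bumped into its first run
lemma gapRuns_fold (s : List Char) : ∀ (acc : List Int) (g : Int),
    s.foldl gapRunsStep (acc ++ [g]) = acc ++ pvBump g (pvRuns s) := by
  induction s with
  | nil => intro acc g; simp [pvRuns, pvBump]
  | cons c t ih =>
    intro acc g
    obtain ⟨r, rs, hr⟩ := pvRuns_cons t
    by_cases hc : c = '-'
    · have hstep : gapRunsStep (acc ++ [g]) c = acc ++ [g + 1] := by
        simp [gapRunsStep, hc, PySem.List.pyGetD_neg_one_append_singleton,
          pySetD_neg_one_append_singleton]
      rw [List.foldl_cons, hstep, ih acc (g + 1)]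
      simp [pvRuns, hr, hc, pvBump]
      omega
    · have hstep : gapRunsStep (acc ++ [g]) c = (acc ++ [g]) ++ [0] := by
        simp [gapRunsStep, hc]
      rw [List.foldl_cons, hstep, ih (acc ++ [g]) 0]
      simp [pvRuns, hr, hc, pvBump]

lemma gap_runs_eq_pvRuns (s : List Char) : gap_runs s = pvRuns s := by
  have h := gapRuns_fold s [] 0
  simpa [gap_runs, pvBump_zero] using h

lemma length_pvUpd (mg : List Int) (i g : Int) : (pvUpd mg i g).length = mg.length := by
  unfold pvUpd; split_ifs <;> simp [PySem.List.length_pySetD]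

lemma length_pvMerge (rs : List Int) : ∀ (mg : List Int) (n : Nat),
    (pvMerge mg n rs).length = mg.length := by
  induction rs with
  | nil => intro mg n; rfl
  | cons g gs ih => intro mg n; rw [pvMerge, ih, length_pvUpd]

lemma pvLast_eq_getLast (r : Int) (rs : List Int) :
    pvLast (r :: rs) = (r :: rs).getLast (List.cons_ne_nil r rs) := by
  induction rs generalizing r with
  | nil => rfl
  | cons a l ih =>
    rw [show pvLast (r :: a :: l) = pvLast (a :: l) from rfl,
      List.getLast_cons (List.cons_ne_nil a l), ih]

lemma pvAfold (s : List Char) : ∀ (mg : List Int) (n : Nat) (gc : Int),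
    s.foldl pvStepA (mg, (n : Int), gc) =
      (pvMerge mg n ((pvBump gc (pvRuns s)).dropLast),
       (n : Int) + (s.countP (fun ch => ch != '-') : Int),
       pvLast (pvBump gc (pvRuns s))) := by
  induction s with
  | nil => intro mg n gc; simp [pvRuns, pvBump, pvMerge, pvLast]
  | cons c t ih =>
    intro mg n gc
    obtain ⟨r, rs, hr⟩ := pvRuns_cons t
    by_cases hc : c = '-'
    · subst hc
      have hs : pvStepA (mg, (n : Int), gc) '-' = (mg, (n : Int), gc + 1) := by
        simp [pvStepA]
      have h2 : pvBump gc (pvRuns ('-' :: t)) = pvBump (gc + 1) (pvRuns t) := by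
        simp [pvRuns, hr, pvBump]; omega
      have h3 : List.countP (fun ch => ch != '-') ('-' :: t) =
          List.countP (fun ch => ch != '-') t := by simp
      rw [List.foldl_cons, hs, ih mg n (gc + 1), h2, h3]
    · have hs : pvStepA (mg, (n : Int), gc) c = (pvUpd mg (n : Int) gc, (n : Int) + 1, 0) := by
        simp [pvStepA, hc]
      have hcast : ((n : Int) + 1) = ((n + 1 : Nat) : Int) := by push_cast; ring
      rw [List.foldl_cons, hs, hcast, ih (pvUpd mg (n : Int) gc) (n + 1) 0]
      have hruns : pvRuns (c :: t) = 0 :: r :: rs := by simp [pvRuns, hr, hc]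
      rw [hruns, hr]
      simp only [pvBump, add_zero, zero_add, List.dropLast_cons₂, pvMerge,
        Prod.mk.injEq]
      refine ⟨trivial, ?_, ?_⟩
      · simp [hc]
        ring
      · rfl

lemma pvGetD_eq_getElem' (mg : List Int) (n : Nat) (h : n < mg.length) :
    PySem.List.pyGetD mg (n : Int) 0 = mg[n] := by
  rw [PySem.List.pyGetD_natCast]
  exact List.getD_eq_getElem mg 0 h

lemma pvSet_max_eq_upd (mg : List Int) (n : Nat) (g : Int) (h : n < mg.length) :
    PySem.List.pySetD mg (n : Int) (max (PySem.List.pyGetD mg (n : Int) 0) g) =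
      pvUpd mg (n : Int) g := by
  unfold pvUpd
  split_ifs with hgt
  · rw [max_eq_right (le_of_lt hgt)]
  · rw [max_eq_left (not_lt.1 hgt), pvGetD_eq_getElem' mg n h,
      PySem.List.pySetD_natCast, List.set_getElem_self]

lemma pvBfold (rs : List Int) : ∀ (mg : List Int) (n : Nat), n + rs.length ≤ mg.length →
    (PySem.List.enumerate rs (n : Int)).foldl pvStepB mg = pvMerge mg n rs := by
  induction rs with
  | nil => intro mg n _; simp [PySem.List.enumerate, pvMerge]
  | cons g gs ih =>
    intro mg n h
    simp only [PySem.List.enumerate, List.foldl_cons]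
    have hstep : pvStepB mg ((n : Int), g) = pvUpd mg (n : Int) g :=
      pvSet_max_eq_upd mg n g (by simp at h; omega)
    have hcast : ((n : Int) + 1) = ((n + 1 : Nat) : Int) := by push_cast; ring
    rw [hstep, hcast, ih (pvUpd mg (n : Int) g) (n + 1)
      (by rw [length_pvUpd]; simp at h; omega)]
    rfl

lemma length_pvRuns (s : List Char) :
    (pvRuns s).length = s.countP (fun ch => ch != '-') + 1 := by
  induction s with
  | nil => rfl
  | cons c t ih =>
    obtain ⟨r, rs, hr⟩ := pvRuns_cons t
    rw [hr] at ih
    by_cases hc : c = '-' <;>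
      simp [pvRuns, hr, hc] at ih ⊢ <;> omega

lemma length_pvPairA (orig_len : Int) (mg : List Int) (p : String × String) :
    (pvPairA orig_len mg p).length = mg.length := by
  have h := pvAfold p.1.toList mg 0 0
  simp only [Nat.cast_zero] at h
  dsimp only [pvPairA]
  rw [h]
  rw [length_pvUpd, length_pvMerge]

lemma pvPair_eq (orig_len : Int) (h0 : 0 ≤ orig_len) (mg : List Int)
    (hlen : mg.length = (orig_len + 1).toNat) (p : String × String)
    (hc : ((p.1.toList.countP (fun ch => ch != '-') : Int) ≤ orig_len + 1)) :
    pvPairA orig_len mg p = pvPairB orig_len mg p := by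
  obtain ⟨r, rs, hr⟩ := pvRuns_cons p.1.toList
  have hfold := pvAfold p.1.toList mg 0 0
  simp only [Nat.cast_zero, pvBump_zero] at hfold
  have hdl : (pvRuns p.1.toList).dropLast.length ≤ mg.length := by
    rw [List.length_dropLast, length_pvRuns, hlen]; omega
  have hb := pvBfold (pvRuns p.1.toList).dropLast mg 0 (by simpa using hdl)
  simp only [Nat.cast_zero] at hb
  have hge : PySem.List.pyGetD (pvRuns p.1.toList) (-1) 0 =
      pvLast (pvRuns p.1.toList) := by
    rw [hr, PySem.List.pyGetD_neg_one (r :: rs) 0 (List.cons_ne_nil r rs)]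
    exact (pvLast_eq_getLast r rs).symm
  have hml : (pvMerge mg 0 (pvRuns p.1.toList).dropLast).length = mg.length :=
    length_pvMerge _ mg 0
  dsimp only [pvPairA, pvPairB]
  rw [gap_runs_eq_pvRuns, hfold, PySem.List.slice_to_neg_one, hb, hge]
  have hcast2 : orig_len = ((orig_len.toNat : Nat) : Int) := (Int.toNat_of_nonneg h0).symm
  rw [hcast2]
  exact (pvSet_max_eq_upd _ orig_len.toNat _ (by rw [hml, hlen]; omega)).symm

lemma pvMain (orig_len : Int) (h0 : 0 ≤ orig_len) :
    ∀ (pairs : List (String × String)) (mg : List Int),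
      mg.length = (orig_len + 1).toNat →
      (∀ p ∈ pairs, ((p.1.toList.countP (fun ch => ch != '-') : Int) ≤ orig_len + 1)) →
      pairs.foldl (pvPairA orig_len) mg = pairs.foldl (pvPairB orig_len) mg := by
  intro pairs
  induction pairs with
  | nil => intro mg _ _; rfl
  | cons p ps ih =>
    intro mg hlen hall
    have hpe := pvPair_eq orig_len h0 mg hlen p (hall p (List.mem_cons_self))
    rw [List.foldl_cons, List.foldl_cons, hpe]
    refine ih (pvPairB orig_len mg p) ?_ (fun q hq => hall q (List.mem_cons_of_mem p hq))
    rw [← hpe, length_pvPairA, hlen]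

-- ===== VERDICT (by name: the statement is the Claim_ definition above) =====
theorem compute_max_gaps_py_spec : Claim_equal_compute_max_gaps_py := by
  intro pairs orig_len _ hpre
  unfold Spec_compute_max_gaps_py compute_max_gaps_py compute_max_gaps_py_alt
  cases pairs with
  | nil => rfl
  | cons p ps =>
    exact pvMain orig_len (hpre.1 (List.cons_ne_nil p ps)) (p :: ps) _
      (by simp) hpre.2
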